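-- pv_equiv track=rewrite | github.com/edweenie123/CCC-Programming-Problems | CCC '18/J3.py | areWeThereYet
-- ===== SOURCE A (Python) =====
-- def areWeThereYet(d1, d2, d3, d4):
--     dist1 = 0, d1, d1+d2, d1+d2+d3, d1+d2+d3+d4
--     dist2 = [d1, 0, d2, d2+d3, d2+d3+d4]
--     dist3 = [d1+d2, d2, 0, d3, d3+d4]
--     dist4 = [d1+d2+d3, d2+d3, d3, 0, d4]
--     dist5 = [d1+d2+d3+d4, d2+d3+d4, d3+d4, d4, 0]
--
--     return " ".join(str(i) for i in dist1) + "\n" + \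
--             " ".join(str(i) for i in dist2) + "\n" + \
--             " ".join(str(i) for i in dist3) + "\n" + \
--             " ".join(str(i) for i in dist4) + "\n" + \
--             " ".join(str(i) for i in dist5)
-- ===== SOURCE B (Python) =====
-- def areWeThereYet(d1, d2, d3, d4):
--     pos = [0, d1, d1 + d2, d1 + d2 + d3, d1 + d2 + d3 + d4]
--     rows = []
--     for i in range(5):
--         rows.append(" ".join(str(pos[max(i, j)] - pos[min(i, j)]) for j in range(5)))
--     return "\n".join(rows)
-- ===== Notes on version B (the rewrite author's own statement) =====
-- stated objective: simpler
-- what changed: Replaces the five hardcoded row lists of pairwise sums by a cumulative-position (prefix-sum) table pos and a nested index loop computing pos[max(i,j)] - pos[min(i,j)] for each entry.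
import Mathlib
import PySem

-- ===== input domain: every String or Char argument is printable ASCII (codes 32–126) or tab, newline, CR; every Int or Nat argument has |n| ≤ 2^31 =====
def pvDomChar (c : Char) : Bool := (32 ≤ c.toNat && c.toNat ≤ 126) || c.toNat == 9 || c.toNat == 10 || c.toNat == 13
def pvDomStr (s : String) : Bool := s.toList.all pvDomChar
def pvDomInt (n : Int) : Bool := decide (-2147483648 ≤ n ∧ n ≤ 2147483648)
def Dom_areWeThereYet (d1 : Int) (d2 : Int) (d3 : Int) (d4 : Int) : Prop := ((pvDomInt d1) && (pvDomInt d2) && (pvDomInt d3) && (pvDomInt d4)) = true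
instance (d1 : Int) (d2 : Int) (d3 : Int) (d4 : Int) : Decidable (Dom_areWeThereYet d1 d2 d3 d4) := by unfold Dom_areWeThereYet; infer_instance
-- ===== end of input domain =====

-- B replaces A's five hardcoded row literals by a prefix-sum table pos and a nested index loop (simpler decomposition; same cost).

-- ===== PORT A =====
def areWeThereYet (d1 : Int) (d2 : Int) (d3 : Int) (d4 : Int) : String :=
  let dist1 : List Int := [0, d1, d1+d2, d1+d2+d3, d1+d2+d3+d4]
  let dist2 : List Int := [d1, 0, d2, d2+d3, d2+d3+d4]
  let dist3 : List Int := [d1+d2, d2, 0, d3, d3+d4]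
  let dist4 : List Int := [d1+d2+d3, d2+d3, d3, 0, d4]
  let dist5 : List Int := [d1+d2+d3+d4, d2+d3+d4, d3+d4, d4, 0]
  PySem.Str.join " " (dist1.map PySem.Int.toStr) ++ "\n" ++
  PySem.Str.join " " (dist2.map PySem.Int.toStr) ++ "\n" ++
  PySem.Str.join " " (dist3.map PySem.Int.toStr) ++ "\n" ++
  PySem.Str.join " " (dist4.map PySem.Int.toStr) ++ "\n" ++
  PySem.Str.join " " (dist5.map PySem.Int.toStr)

-- ===== PORT B =====
def areWeThereYet_alt (d1 : Int) (d2 : Int) (d3 : Int) (d4 : Int) : String :=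
  let pos : List Int := [0, d1, d1 + d2, d1 + d2 + d3, d1 + d2 + d3 + d4]
  let rows : List String :=
    (PySem.List.pyRange 0 5 1).foldl (fun acc i =>
      acc ++ [PySem.Str.join " " ((PySem.List.pyRange 0 5 1).map (fun j =>
        PySem.Int.toStr (PySem.List.pyGetD pos (max i j) 0 - PySem.List.pyGetD pos (min i j) 0)))]) []
  PySem.Str.join "\n" rows

-- ===== PRECONDITION & SPEC =====
def Spec_areWeThereYet (d1 : Int) (d2 : Int) (d3 : Int) (d4 : Int) (out : String) : Prop := out = areWeThereYet_alt d1 d2 d3 d4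
instance (d1 : Int) (d2 : Int) (d3 : Int) (d4 : Int) (out : String) : Decidable (Spec_areWeThereYet d1 d2 d3 d4 out) := by unfold Spec_areWeThereYet; infer_instance

-- ===== CLAIM (what is proved, stated in full; the proofs are below) =====
def Claim_equal_areWeThereYet : Prop := ∀ (d1 : Int) (d2 : Int) (d3 : Int) (d4 : Int), Dom_areWeThereYet d1 d2 d3 d4 → Spec_areWeThereYet d1 d2 d3 d4 (areWeThereYet d1 d2 d3 d4)

-- ===== LEMMAS AND PROOFS =====

-- ===== VERDICT (by name: the statement is the Claim_ definition above) =====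
theorem areWeThereYet_spec : Claim_equal_areWeThereYet := by
  intro d1 d2 d3 d4 _
  unfold Spec_areWeThereYet areWeThereYet areWeThereYet_alt
  simp [PySem.List.pyRange, PySem.List.pyGetD, PySem.Str.join, PySem.List.pyGet?, PySem.List.pyIdx?, List.range_succ]
  apply String.toList_inj.mp
  simp [PySem.Chars.join, List.intercalate, List.intersperse]
  ring_nf
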